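-- pv_equiv track=rewrite | github.com/ajavid34/Data-Structure | ca1/problem3.py | find_most_valuable
-- ===== SOURCE A (Python) =====
-- def find_most_valuable(l, r):
--     current_num = l
--     while current_num < r:
--         new_num = (current_num + 1) | current_num
--         if new_num <= r:
--             current_num = new_num
--         else:
--             break
--     return current_num
-- ===== SOURCE B (Python) =====
-- def find_most_valuable(l, r):
--     # Every value reachable by the OR-chain from l is l with its lowest k bits
--     # forced to 1, and these values grow with k.  Binary-search the largest
--     # k in [0, 64] whose value still fits under r.
--     if l >= r:
--         return l
--     lo, hi = 0, 64
--     while lo < hi: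
--         mid = (lo + hi + 1) // 2
--         if (l | ((1 << mid) - 1)) <= r:
--             lo = mid
--         else:
--             hi = mid - 1
--     return l | ((1 << lo) - 1)
-- ===== Notes on version B (the rewrite author's own statement) =====
-- stated objective: alternative
-- what changed: Instead of stepping the OR-chain current |= current+1 until it would exceed r, B uses the closed form that every reachable value is l | ((1<<k)-1) and binary-searches the largest k in [0,64] whose value still fits under r; Pre_ excludes l<0 with r>=0, where A loops forever (never returns) because the chain sticks at -1.
import Mathlib
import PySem

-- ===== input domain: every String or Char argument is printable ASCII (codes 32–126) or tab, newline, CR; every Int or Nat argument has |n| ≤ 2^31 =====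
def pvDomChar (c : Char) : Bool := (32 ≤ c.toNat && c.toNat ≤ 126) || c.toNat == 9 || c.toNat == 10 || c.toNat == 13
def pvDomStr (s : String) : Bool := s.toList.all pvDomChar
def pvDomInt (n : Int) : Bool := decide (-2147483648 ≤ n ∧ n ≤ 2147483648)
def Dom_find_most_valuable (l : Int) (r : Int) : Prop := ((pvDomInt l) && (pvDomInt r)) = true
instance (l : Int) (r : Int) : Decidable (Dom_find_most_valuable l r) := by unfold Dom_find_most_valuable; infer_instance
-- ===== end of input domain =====

-- B replaces A's OR-chain stepping by the closed form l | ((1<<k)-1) with a binary search on k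
-- (an alternative algorithm, not claimed faster); Pre_ excludes the inputs where A never returns.

-- ===== PORT A =====
-- A's while-loop with fuel; inside Dom ∧ Pre_ the loop makes at most 65 iterations (each
-- iteration strictly increases the state, which stays of the form l | ((1<<k)-1) with k ≤ 64),
-- so fuel 100 is never exhausted on the inputs the claim covers; outside Pre_ A diverges.
def pyA_loop (r : Int) (fuel : Nat) (c : Int) : Int :=
  match fuel with
  | 0 => c
  | Nat.succ f =>
    if c < r then
      let new_num := PySem.Int.bor (c + 1) c
      if new_num ≤ r then pyA_loop r f new_num else c
    else c

def find_most_valuable (l : Int) (r : Int) : Int :=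
  pyA_loop r 100 l

-- ===== PORT B =====
-- Source B's while-loop over the pair (lo, hi), guarded by fuel (the halving loop makes at most 7
-- iterations from (0, 64), so fuel 100 is never exhausted); mid ≥ 0 always, so Python's
-- 1 << mid is (1:Int) <<< mid.toNat
def fmvGo (l : Int) (r : Int) (fuel : Nat) (lo : Int) (hi : Int) : Int :=
  match fuel with
  | 0 => lo
  | Nat.succ f =>
    if lo < hi then
      let mid := PySem.Int.floordiv (lo + hi + 1) 2
      if PySem.Int.bor l ((1 : Int) <<< mid.toNat - 1) ≤ r then fmvGo l r f mid hi
      else fmvGo l r f lo (mid - 1)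
    else lo

def find_most_valuable_alt (l : Int) (r : Int) : Int :=
  if l ≥ r then l
  else PySem.Int.bor l ((1 : Int) <<< (fmvGo l r 100 0 64).toNat - 1)

-- ===== PRECONDITION & SPEC =====
-- Pre_ excludes exactly the inputs (l < 0 together with r ≥ 0) on which A's while-loop never
-- terminates: the OR-chain from a negative l reaches -1, and (-1+1) | -1 = -1 ≤ r keeps the
-- loop spinning forever, so A returns on an input iff this Pre_ holds.
def Pre_find_most_valuable (l : Int) (r : Int) : Prop := 0 ≤ l ∨ r < 0
instance (l : Int) (r : Int) : Decidable (Pre_find_most_valuable l r) := by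
  unfold Pre_find_most_valuable; infer_instance

def pvWitness_find_most_valuable : Int × Int := (5, 12)

def Spec_find_most_valuable (l : Int) (r : Int) (out : Int) : Prop := out = find_most_valuable_alt l r
instance (l : Int) (r : Int) (out : Int) : Decidable (Spec_find_most_valuable l r out) := by
  unfold Spec_find_most_valuable; infer_instance

-- ===== CLAIM (what is proved, stated in full; the proofs are below) =====
def Claim_equal_find_most_valuable : Prop := ∀ (l : Int) (r : Int), Dom_find_most_valuable l r → Pre_find_most_valuable l r → Spec_find_most_valuable l r (find_most_valuable l r)

-- ===== LEMMAS AND PROOFS =====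

-- the value "l with its lowest k bits forced to 1"
def fmvV (l : Int) (k : Nat) : Int := PySem.Int.bor l (2 ^ k - 1)

-- Nat-side bit lemmas ------------------------------------------------------

theorem fmv_testBit_mul (k a i : Nat) :
    (2 ^ k * a).testBit i = if i < k then false else a.testBit (i - k) := by
  rw [show (2:Nat) ^ k * a = 2 ^ k * a + 0 by ring,
      Nat.testBit_two_pow_mul_add _ (Nat.two_pow_pos k)]
  simp

theorem fmv_testBit_pred (m : Nat) (hm : m % 2 = 1) (j : Nat) :
    (m - 1).testBit j = if j = 0 then false else m.testBit j := by
  have h2 : m - 1 = 2 ^ 1 * (m / 2) + 0 := by omega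
  have h3 : m = 2 ^ 1 * (m / 2) + 1 := by omega
  rw [h2, Nat.testBit_two_pow_mul_add _ (by norm_num)]
  conv_rhs => rw [h3, Nat.testBit_two_pow_mul_add _ (by norm_num)]
  by_cases hj : j = 0
  · simp [hj]
  · have hj1 : ¬ j < 1 := by omega
    simp [hj, hj1]

theorem fmv_nat_lor_mask (n k : Nat) :
    n ||| (2 ^ k - 1) = 2 ^ k * (n / 2 ^ k) + (2 ^ k - 1) := by
  have hp : 0 < 2 ^ k := Nat.two_pow_pos k
  apply Nat.eq_of_testBit_eq
  intro i
  rw [Nat.testBit_lor, Nat.testBit_two_pow_mul_add _ (by omega),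
      Nat.testBit_two_pow_sub_one]
  by_cases h : i < k
  · simp [h]
  · have hik : i - k + k = i := by omega
    simp [h, Nat.testBit_div_two_pow, hik]

theorem fmv_nat_step_pos (k m : Nat) (hm : m % 2 = 1) :
    (2 ^ k * m) ||| (2 ^ k * m - 1) = 2 ^ k * m + (2 ^ k - 1) := by
  have hp : 0 < 2 ^ k := Nat.two_pow_pos k
  obtain ⟨m', rfl⟩ : ∃ m', m = m' + 1 := ⟨m - 1, by omega⟩
  have hexp : 2 ^ k * (m' + 1) = 2 ^ k * m' + 2 ^ k := by ring
  have hsplit : 2 ^ k * (m' + 1) - 1 = 2 ^ k * m' + (2 ^ k - 1) := by omega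
  apply Nat.eq_of_testBit_eq
  intro i
  rw [Nat.testBit_lor, hsplit, fmv_testBit_mul,
      Nat.testBit_two_pow_mul_add _ (by omega), Nat.testBit_two_pow_mul_add _ (by omega)]
  by_cases h : i < k
  · simp [h, Nat.testBit_two_pow_sub_one]
  · simp only [if_neg h]
    have hpred := fmv_testBit_pred (m' + 1) hm (i - k)
    simp only [Nat.add_sub_cancel] at hpred
    by_cases hj : i - k = 0
    · have hb0 : (m' + 1).testBit 0 = true := by
        simp [Nat.testBit_zero]; omega
      simp [hj, hb0]
    · rw [hpred, if_neg hj]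
      simp

theorem fmv_nat_step_neg (k w : Nat) (hw : w % 2 = 1) :
    (2 ^ k * w - 1) &&& (2 ^ k * w) = 2 ^ k * (w - 1) := by
  have hp : 0 < 2 ^ k := Nat.two_pow_pos k
  obtain ⟨w', rfl⟩ : ∃ w', w = w' + 1 := ⟨w - 1, by omega⟩
  have hsplit : 2 ^ k * (w' + 1) - 1 = 2 ^ k * w' + (2 ^ k - 1) := by
    have hexp : 2 ^ k * (w' + 1) = 2 ^ k * w' + 2 ^ k := by ring
    omega
  apply Nat.eq_of_testBit_eq
  intro i
  rw [Nat.testBit_land, hsplit, Nat.testBit_two_pow_mul_add _ (by omega),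
      fmv_testBit_mul, Nat.add_sub_cancel, fmv_testBit_mul]
  by_cases h : i < k
  · simp [h]
  · simp only [if_neg h]
    have hpred := fmv_testBit_pred (w' + 1) hw (i - k)
    simp only [Nat.add_sub_cancel] at hpred
    by_cases hj : i - k = 0
    · rw [hpred, if_pos hj]
      simp
    · rw [hpred, if_neg hj]
      simp

-- Int-side: the closed form of fmvV and the chain-step identities ----------

theorem fmv_mask_cast (k : Nat) : ((2:Int) ^ k - 1) = ((2 ^ k - 1 : Nat) : Int) := by
  have h : 1 ≤ 2 ^ k := Nat.one_le_two_pow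
  rw [Nat.cast_sub h]; push_cast; ring

theorem fmv_v_eq (l : Int) (k : Nat) :
    fmvV l k = 2 ^ k * (l / 2 ^ k) + 2 ^ k - 1 := by
  have hp : 0 < 2 ^ k := Nat.two_pow_pos k
  by_cases hl : 0 ≤ l
  · rw [fmvV, fmv_mask_cast, PySem.Int.bor_of_nonneg hl (by positivity), Int.toNat_natCast,
        fmv_nat_lor_mask]
    push_cast [Nat.one_le_two_pow]
    rw [Int.toNat_of_nonneg hl]; ring
  · rw [fmvV, fmv_mask_cast]
    simp only [PySem.Int.bor, if_neg hl, if_pos (by positivity : (0:Int) ≤ ((2 ^ k - 1 : Nat) : Int)),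
      Int.toNat_natCast]
    rw [Nat.and_two_pow_sub_one_eq_mod]
    set n : Nat := (-l - 1).toNat with hn
    have hln : l = -1 - (n : Int) := by omega
    have hdm : (n : Int) = 2 ^ k * ((n / 2 ^ k : Nat) : Int) + ((n % 2 ^ k : Nat) : Int) := by
      exact_mod_cast (Nat.div_add_mod n (2 ^ k)).symm
    have hmodlt : ((n % 2 ^ k : Nat) : Int) < 2 ^ k := by
      have := Nat.mod_lt n hp
      exact_mod_cast this
    have hmod0 : (0:Int) ≤ ((n % 2 ^ k : Nat) : Int) := by positivity
    have hdiv : (-1 - (n : Int)) / (2 ^ k : Int) = -1 - ((n / 2 ^ k : Nat) : Int) := by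
      have h2 : (0:Int) < 2 ^ k := by positivity
      exact ((Int.ediv_emod_unique (a := -1 - (n:Int)) (b := 2 ^ k)
        (r := 2 ^ k - 1 - ((n % 2 ^ k : Nat) : Int))
        (q := -1 - ((n / 2 ^ k : Nat) : Int)) h2).mpr
        ⟨by linear_combination hdm, by linarith, by linarith⟩).1
    rw [hln, hdiv]
    have hsub : ((n - n % 2 ^ k : Nat) : Int) = 2 ^ k * ((n / 2 ^ k : Nat) : Int) := by
      rw [Nat.cast_sub (Nat.mod_le _ _)]
      linear_combination hdm
    rw [hsub]; ring

theorem fmv_div_succ (l : Int) (k : Nat) : l / 2 ^ (k + 1) = (l / 2 ^ k) / 2 := by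
  rw [Int.ediv_ediv_of_nonneg (by positivity), ← pow_succ]

theorem fmv_mono_succ (l : Int) (k : Nat) : fmvV l k ≤ fmvV l (k + 1) := by
  rw [fmv_v_eq, fmv_v_eq, fmv_div_succ, pow_succ]
  set q := l / 2 ^ k with hq
  have h2 : q = 2 * (q / 2) + q % 2 := by omega
  have hp : (0:Int) ≤ 2 ^ k := by positivity
  have hqe : 2 ^ k * q = 2 * (2 ^ k * (q / 2)) + 2 ^ k * (q % 2) := by
    linear_combination (2 ^ k : Int) * h2
  have hb : 2 ^ k * (q % 2) ≤ 2 ^ k * 1 := mul_le_mul_of_nonneg_left (by omega) hp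
  nlinarith [hqe, hb]

theorem fmv_mono (l : Int) {k j : Nat} (h : k ≤ j) : fmvV l k ≤ fmvV l j := by
  induction j with
  | zero => simp_all
  | succ j ih =>
    rcases Nat.lt_or_ge k (j + 1) with h' | h'
    · exact le_trans (ih (by omega)) (fmv_mono_succ l j)
    · have hkj : k = j + 1 := by omega
      simp [hkj]

theorem fmv_absorb (l : Int) (k : Nat) (hq : (l / 2 ^ k) % 2 = 1) :
    fmvV l (k + 1) = fmvV l k := by
  rw [fmv_v_eq, fmv_v_eq, fmv_div_succ, pow_succ]
  set q := l / 2 ^ k with hqd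
  have h2 : q = 2 * (q / 2) + 1 := by omega
  linear_combination (-(2 ^ k) : Int) * h2

theorem fmv_step_int (k : Nat) (u : Int) (hu : u % 2 = 1) :
    PySem.Int.bor (2 ^ k * u) (2 ^ k * u - 1) = 2 ^ k * u + 2 ^ k - 1 := by
  have hpn : (0:Nat) < 2 ^ k := Nat.two_pow_pos k
  have hp : (0:Int) < 2 ^ k := by positivity
  have hcast : ((2 ^ k : Nat) : Int) = 2 ^ k := by push_cast; ring
  rcases lt_trichotomy u 0 with hneg | rfl | hpos
  · have hx : 2 ^ k * u < 0 := mul_neg_of_pos_of_neg hp hneg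
    set w : Nat := (-u).toNat with hw
    have huw : (u : Int) = -(w : Int) := by omega
    have hw1 : 1 ≤ w := by omega
    have hwodd : w % 2 = 1 := by omega
    have ha1 : -(2 ^ k * u) - 1 = ((2 ^ k * w - 1 : Nat) : Int) := by
      have : ((2 ^ k * w - 1 : Nat) : Int) = (2 ^ k : Int) * w - 1 := by
        have hle : 1 ≤ 2 ^ k * w := Nat.mul_pos hpn (by omega)
        push_cast [hle]; ring
      rw [this, huw]; ring
    have ha2 : -(2 ^ k * u - 1) - 1 = ((2 ^ k * w : Nat) : Int) := by
      push_cast [huw]; ring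
    simp only [PySem.Int.bor, if_neg (not_le.mpr (by linarith : 2 ^ k * u < 0)),
      if_neg (not_le.mpr (by linarith : 2 ^ k * u - 1 < 0))]
    have ht1 : (-(2 ^ k * u) - 1).toNat = 2 ^ k * w - 1 := by
      rw [show -(2 ^ k * u) - 1 = ((2 ^ k * w - 1 : Nat) : Int) from ha1, Int.toNat_natCast]
    have ht2 : (-(2 ^ k * u - 1) - 1).toNat = 2 ^ k * w := by
      rw [show -(2 ^ k * u - 1) - 1 = ((2 ^ k * w : Nat) : Int) from ha2, Int.toNat_natCast]
    rw [ht1, ht2, fmv_nat_step_neg k w hwodd]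
    have hwm : ((2 ^ k * (w - 1) : Nat) : Int) = 2 ^ k * ((w:Int) - 1) := by
      push_cast [hw1]; ring
    rw [hwm, huw]; ring
  · omega
  · have hx : (0:Int) ≤ 2 ^ k * u := by positivity
    have hk1 : (1:Int) ≤ 2 ^ k := by rw [← hcast]; exact_mod_cast Nat.one_le_two_pow
    have hx1 : (1:Int) ≤ 2 ^ k * u := by nlinarith [hpos, hk1]
    rw [PySem.Int.bor_of_nonneg hx (by linarith)]
    have hut : (u : Int) = ((u.toNat : Nat) : Int) := by omega
    have htodd : u.toNat % 2 = 1 := by omega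
    have ht1 : (2 ^ k * u).toNat = 2 ^ k * u.toNat := by
      rw [show (2:Int) ^ k * u = ((2 ^ k * u.toNat : Nat) : Int) by push_cast [← hut]; ring,
        Int.toNat_natCast]
    have ht2 : (2 ^ k * u - 1).toNat = 2 ^ k * u.toNat - 1 := by
      have : (2:Int) ^ k * u - 1 = ((2 ^ k * u.toNat - 1 : Nat) : Int) := by
        have hle : 1 ≤ 2 ^ k * u.toNat := Nat.mul_pos hpn (by omega)
        push_cast [hle, ← hut]; ring
      rw [this, Int.toNat_natCast]
    rw [ht1, ht2, fmv_nat_step_pos k u.toNat htodd]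
    have hle : 1 ≤ 2 ^ k := Nat.one_le_two_pow
    push_cast [hle, ← hut]
    ring

theorem fmv_crux (l : Int) (k : Nat) (hq : (l / 2 ^ k) % 2 = 0) :
    PySem.Int.bor (fmvV l k + 1) (fmvV l k) = fmvV l (k + 1) := by
  have hv := fmv_v_eq l k
  set q := l / 2 ^ k with hqd
  have hc1 : fmvV l k + 1 = 2 ^ k * (q + 1) := by rw [hv]; ring
  have hc0 : fmvV l k = 2 ^ k * (q + 1) - 1 := by rw [hv]; ring
  have hu : (q + 1) % 2 = 1 := by omega
  rw [hc1, hc0, fmv_step_int k (q + 1) hu, fmv_v_eq, fmv_div_succ, ← hqd, pow_succ]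
  have h2 : q = 2 * (q / 2) := by omega
  linear_combination (2 ^ k : Int) * h2

-- saturation: inside Dom ∧ Pre_, the level-64 value never lies strictly below r
theorem fmv_sat (l r : Int)
    (hD : -2147483648 ≤ l ∧ l ≤ 2147483648 ∧ -2147483648 ≤ r ∧ r ≤ 2147483648)
    (hP : 0 ≤ l ∨ r < 0) : ¬ fmvV l 64 < r := by
  rw [fmv_v_eq]
  norm_num
  omega

-- A's loop returns the best mask value ------------------------------------

theorem fmv_loopA (l r : Int)
    (hD : -2147483648 ≤ l ∧ l ≤ 2147483648 ∧ -2147483648 ≤ r ∧ r ≤ 2147483648)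
    (hP : 0 ≤ l ∨ r < 0) :
    ∀ (j k fuel : Nat), k + j = 65 → k ≤ 64 → 65 - k ≤ fuel → fmvV l k ≤ r →
      pyA_loop r fuel (fmvV l k) =
        fmvV l (Nat.findGreatest (fun i => fmvV l i ≤ r) 64) := by
  intro j
  induction j with
  | zero => intro k fuel h1 h2 _ _; omega
  | succ j ih =>
    intro k fuel hkj hk64 hfuel hle
    have hPG : fmvV l (Nat.findGreatest (fun i => fmvV l i ≤ r) 64) ≤ r :=
      Nat.findGreatest_spec (P := fun i => fmvV l i ≤ r) (m := k) (by omega) hle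
    have hkG : k ≤ Nat.findGreatest (fun i => fmvV l i ≤ r) 64 :=
      Nat.le_findGreatest (by omega) hle
    by_cases hcr : fmvV l k < r
    · have hk63 : k < 64 := by
        rcases Nat.lt_or_ge k 64 with h | h
        · exact h
        · exfalso
          have hk : k = 64 := by omega
          exact fmv_sat l r hD hP (hk ▸ hcr)
      by_cases habs : fmvV l (k + 1) = fmvV l k
      · have := ih (k + 1) fuel (by omega) (by omega) (by omega) (by rw [habs]; exact hle)
        rw [habs] at this
        exact this
      · have hq0 : (l / 2 ^ k) % 2 = 0 := by
          rcases Int.emod_two_eq_zero_or_one (l / 2 ^ k) with h | h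
          · exact h
          · exact absurd (fmv_absorb l k h) habs
        have hstep := fmv_crux l k hq0
        obtain ⟨f, rfl⟩ : ∃ f, fuel = f + 1 := ⟨fuel - 1, by omega⟩
        show (if fmvV l k < r then
            if PySem.Int.bor (fmvV l k + 1) (fmvV l k) ≤ r then
              pyA_loop r f (PySem.Int.bor (fmvV l k + 1) (fmvV l k))
            else fmvV l k
          else fmvV l k) = _
        rw [if_pos hcr, hstep]
        by_cases hnr : fmvV l (k + 1) ≤ r
        · rw [if_pos hnr]
          exact ih (k + 1) f (by omega) (by omega) (by omega) hnr
        · rw [if_neg hnr]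
          have hGk : Nat.findGreatest (fun i => fmvV l i ≤ r) 64 ≤ k := by
            by_contra hgt
            exact hnr (le_trans (fmv_mono l (by omega : k + 1 ≤ _)) hPG)
          rw [le_antisymm hkG hGk]
    · obtain ⟨f, rfl⟩ : ∃ f, fuel = f + 1 := ⟨fuel - 1, by omega⟩
      show (if fmvV l k < r then
            if PySem.Int.bor (fmvV l k + 1) (fmvV l k) ≤ r then
              pyA_loop r f (PySem.Int.bor (fmvV l k + 1) (fmvV l k))
            else fmvV l k
          else fmvV l k) = _
      rw [if_neg hcr]
      exact le_antisymm (fmv_mono l hkG) (le_trans hPG (not_lt.mp hcr))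

-- B's binary search returns the same index --------------------------------

theorem fmv_goB (l r : Int) :
    ∀ (fuel : Nat) (lo hi : Int), (hi - lo).toNat < fuel → 0 ≤ lo → lo ≤ hi → hi ≤ 64 →
      fmvV l lo.toNat ≤ r → (∀ i : Nat, i ≤ 64 → fmvV l i ≤ r → (i : Int) ≤ hi) →
      fmvGo l r fuel lo hi = (Nat.findGreatest (fun i => fmvV l i ≤ r) 64 : Int) := by
  intro fuel
  induction fuel with
  | zero => intro lo hi hn; omega
  | succ f ih =>
    intro lo hi hn hlo0 hlohi hhi64 hPlo hUB
    by_cases hlt : lo < hi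
    · have hmid : PySem.Int.floordiv (lo + hi + 1) 2 = (lo + hi + 1) / 2 :=
        PySem.Int.floordiv_eq_ediv_of_pos (by norm_num)
      show (if lo < hi then
            if PySem.Int.bor l ((1 : Int) <<< (PySem.Int.floordiv (lo + hi + 1) 2).toNat - 1) ≤ r
            then fmvGo l r f (PySem.Int.floordiv (lo + hi + 1) 2) hi
            else fmvGo l r f lo (PySem.Int.floordiv (lo + hi + 1) 2 - 1)
          else lo) = _
      rw [if_pos hlt, hmid]
      have hmb : lo < (lo + hi + 1) / 2 ∧ (lo + hi + 1) / 2 ≤ hi := by omega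
      have hmask : PySem.Int.bor l ((1 : Int) <<< ((lo + hi + 1) / 2).toNat - 1) =
          fmvV l ((lo + hi + 1) / 2).toNat := by
        rw [Int.shiftLeft_eq, one_mul, fmvV]
      rw [hmask]
      by_cases hPm : fmvV l ((lo + hi + 1) / 2).toNat ≤ r
      · rw [if_pos hPm]
        exact ih _ hi (by omega) (by omega) (by omega) hhi64 hPm hUB
      · rw [if_neg hPm]
        apply ih lo ((lo + hi + 1) / 2 - 1) (by omega) hlo0 (by omega) (by omega) hPlo
        intro i hi64 hPi
        by_contra hgt
        have hmi : ((lo + hi + 1) / 2).toNat ≤ i := by omega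
        exact hPm (le_trans (fmv_mono l hmi) hPi)
    · show (if lo < hi then _ else lo) = _
      rw [if_neg hlt]
      have hPG : fmvV l (Nat.findGreatest (fun i => fmvV l i ≤ r) 64) ≤ r :=
        Nat.findGreatest_spec (P := fun i => fmvV l i ≤ r) (m := lo.toNat) (by omega) hPlo
      have h1 : ((Nat.findGreatest (fun i => fmvV l i ≤ r) 64 : Nat) : Int) ≤ hi :=
        hUB _ (Nat.findGreatest_le 64) hPG
      have h2 : lo.toNat ≤ Nat.findGreatest (fun i => fmvV l i ≤ r) 64 :=
        Nat.le_findGreatest (by omega) hPlo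
      omega

-- ===== VERDICT (by name: the statement is the Claim_ definition above) =====
theorem find_most_valuable_spec : Claim_equal_find_most_valuable := by
  intro l r hD hP
  have hD' : -2147483648 ≤ l ∧ l ≤ 2147483648 ∧ -2147483648 ≤ r ∧ r ≤ 2147483648 := by
    unfold Dom_find_most_valuable pvDomInt at hD
    simp only [Bool.and_eq_true, decide_eq_true_eq] at hD
    exact ⟨hD.1.1, hD.1.2, hD.2.1, hD.2.2⟩
  have hP' : 0 ≤ l ∨ r < 0 := hP
  unfold Spec_find_most_valuable find_most_valuable find_most_valuable_alt
  by_cases hlr : l ≥ r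
  · rw [if_pos hlr, show (100 : Nat) = 99 + 1 from rfl]
    show (if l < r then _ else l) = l
    rw [if_neg (not_lt.mpr hlr)]
  · rw [if_neg hlr]
    have hstart : fmvV l 0 = l := by simp [fmvV]
    have hA := fmv_loopA l r hD' hP' 65 0 100 (by omega) (by omega) (by omega)
      (by rw [hstart]; omega)
    rw [hstart] at hA
    have hB := fmv_goB l r 100 0 64 (by norm_num) (by norm_num) (by norm_num) (by norm_num)
      (by simpa [hstart, Int.toNat_zero] using (by omega : l ≤ r))
      (fun i h _ => by exact_mod_cast Nat.cast_le.mpr h)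
    rw [hB, Int.toNat_natCast, Int.shiftLeft_eq, one_mul]
    exact hA
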